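-- pv_equiv track=rewrite | github.com/sarsator/plugin_ailabsaudit_tracke | collectors/log-agent/ailabsaudit-agent.py | match_referrer
-- ===== SOURCE A (Python) =====
-- def match_referrer(referer, ai_referrers):
--     if not referer:
--         return None
--     try:
--         # Extract hostname from referer URL.
--         host = referer.split("//")[-1].split("/")[0].split(":")[0].lower()
--     except (IndexError, ValueError):
--         return None
--     if not host:
--         return None
--     for domain in ai_referrers:
--         domain_lower = domain.lower()
--         if host == domain_lower or host.endswith("." + domain_lower):
--             return domain
--     return None
-- ===== SOURCE B (Python) =====
-- def match_referrer(referer, ai_referrers):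
--     if not referer:
--         return None
--     host = referer.split("//")[-1].split("/")[0].split(":")[0].lower()
--     if not host:
--         return None
--     # Index each lowered domain by its first position, once.
--     first_idx = {}
--     for i, d in enumerate(ai_referrers):
--         dl = d.lower()
--         if dl not in first_idx:
--             first_idx[dl] = i
--     # Walk the dot-suffixes of host; keep the lowest matching index.
--     best = None
--     cand = host
--     while True:
--         j = first_idx.get(cand)
--         if j is not None and (best is None or j < best):
--             best = j
--         dot = cand.find(".")
--         if dot == -1:
--             break
--         cand = cand[dot + 1:]
--     if best is None:
--         return None
--     return ai_referrers[best]
-- ===== Notes on version B (the rewrite author's own statement) =====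
-- stated objective: alternative
-- what changed: Instead of scanning the domain list and testing host==d or host.endswith('.'+d) per domain, B builds a lowered-domain -> first-index dict once and probes only the host's dot-suffixes, returning the domain of the lowest matching index.
import Mathlib
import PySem

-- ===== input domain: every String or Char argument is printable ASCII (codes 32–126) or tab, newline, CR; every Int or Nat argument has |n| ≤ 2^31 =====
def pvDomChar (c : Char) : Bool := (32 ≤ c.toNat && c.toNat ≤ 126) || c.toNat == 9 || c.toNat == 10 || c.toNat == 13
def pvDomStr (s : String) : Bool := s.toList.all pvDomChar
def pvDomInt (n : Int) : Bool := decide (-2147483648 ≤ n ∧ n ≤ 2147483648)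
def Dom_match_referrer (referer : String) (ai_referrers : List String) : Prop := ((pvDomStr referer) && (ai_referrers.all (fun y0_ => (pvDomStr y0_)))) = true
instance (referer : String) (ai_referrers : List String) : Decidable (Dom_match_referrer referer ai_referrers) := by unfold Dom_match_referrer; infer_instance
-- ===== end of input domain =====

-- B replaces A's per-domain endswith scan by a first-index dict over the lowered
-- domains probed at the host's dot-suffixes (lowest index wins); objective:
-- alternative algorithm of similar cost.

-- ===== PORT A =====
-- host = referer.split("//")[-1].split("/")[0].split(":")[0].lower()  (shared line of both Pythons)
def pvExtractHost (referer : String) : String :=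
  let t1 := PySem.List.pyGetD ((PySem.Str.split? referer "//").getD []) (-1) ""
  let t2 := PySem.List.pyGetD ((PySem.Str.split? t1 "/").getD []) 0 ""
  let t3 := PySem.List.pyGetD ((PySem.Str.split? t2 ":").getD []) 0 ""
  PySem.Str.lower t3

-- for domain in ai_referrers: … return domain
def pvMatchLoop (host : String) : List String → Option String
  | [] => none
  | d :: rest =>
    let dl := PySem.Str.lower d
    if host == dl || PySem.Str.endswith host ("." ++ dl) then some d
    else pvMatchLoop host rest

def match_referrer (referer : String) (ai_referrers : List String) : Option String :=
  if referer == "" then none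
  else
    let host := pvExtractHost referer
    if host == "" then none
    else pvMatchLoop host ai_referrers

-- ===== PORT B =====
-- first_idx: lowered domain -> first index (keys as List Char)
def pvBuildIdx : List String → Nat → PySem.Dict (List Char) Nat → PySem.Dict (List Char) Nat
  | [], _, d => d
  | x :: rest, i, d =>
      let dl := PySem.Chars.lower x.toList
      pvBuildIdx rest (i + 1) (if d.contains dl then d else d.insert dl i)

-- the while loop over the dot-suffixes of host, keeping the lowest index
def pvScan (cand : List Char) (idx : PySem.Dict (List Char) Nat) (best : Option Nat) : Option Nat :=
  let best' :=
    match idx.get? cand with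
    | some j => match best with
                | none => some j
                | some b => if j < b then some j else some b
    | none => best
  let dot := PySem.Chars.find cand ['.']
  if h : dot = -1 then best'
  else pvScan (cand.drop (dot.toNat + 1)) idx best'
termination_by cand.length
decreasing_by
  have hin : ['.'] <:+: cand := by
    have := PySem.Chars.find_ne_neg_one_iff (s := cand) (sub := ['.'])
    exact this.mp h
  have hne : cand ≠ [] := by
    rintro rfl
    simpa using hin.length_le
  simp only [List.length_drop]
  have : 0 < cand.length := List.length_pos_iff.mpr hne
  omega

def match_referrer_alt (referer : String) (ai_referrers : List String) : Option String :=
  if referer == "" then none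
  else
    let host := pvExtractHost referer
    if host == "" then none
    else
      let idx := pvBuildIdx ai_referrers 0 PySem.Dict.empty
      match pvScan host.toList idx none with
      | none => none
      | some j => PySem.List.pyGet? ai_referrers (j : Int)

-- ===== PRECONDITION & SPEC =====
def Spec_match_referrer (referer : String) (ai_referrers : List String) (out : Option String) : Prop := out = match_referrer_alt referer ai_referrers
instance (referer : String) (ai_referrers : List String) (out : Option String) : Decidable (Spec_match_referrer referer ai_referrers out) := by unfold Spec_match_referrer; infer_instance

-- ===== CLAIM (what is proved, stated in full; the proofs are below) =====
def Claim_equal_match_referrer : Prop := ∀ (referer : String) (ai_referrers : List String), Dom_match_referrer referer ai_referrers → Spec_match_referrer referer ai_referrers (match_referrer referer ai_referrers)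


-- ===== LEMMAS AND PROOFS =====

-- the dot-suffix chain of a host: the host itself and every suffix that follows a '.'
def pvChain (c : List Char) : List (List Char) :=
  let dot := PySem.Chars.find c ['.']
  if h : dot = -1 then [c]
  else c :: pvChain (c.drop (dot.toNat + 1))
termination_by c.length
decreasing_by
  have hin : ['.'] <:+: c := (PySem.Chars.find_ne_neg_one_iff c ['.']).mp h
  have hne : c ≠ [] := by rintro rfl; simpa using hin.length_le
  simp only [List.length_drop]
  have : 0 < c.length := List.length_pos_iff.mpr hne
  omega

theorem pvChain_mem (c s : List Char) :
    s ∈ pvChain c ↔ (s = c ∨ ('.' :: s) <:+ c) := by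
  fun_induction pvChain c with
  | case1 c dot h =>
    constructor
    · intro hs
      exact Or.inl (List.mem_singleton.mp hs)
    · rintro (rfl | hsuf)
      · exact List.mem_singleton_self _
      · exfalso
        obtain ⟨t, ht⟩ := hsuf
        exact (PySem.Chars.find_ne_neg_one_iff c ['.']).mpr ⟨t, s, by simpa using ht⟩ h
  | case2 c dot h ih =>
    have hnn : 0 ≤ dot := by
      have := PySem.Chars.neg_one_le_find c ['.']
      simp only [dot] at *
      omega
    obtain ⟨hpre, hmin⟩ := PySem.Chars.find_spec (s := c) (sub := ['.']) hnn
    obtain ⟨u, hu⟩ := hpre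
    have hkey : c.drop dot.toNat = '.' :: c.drop (dot.toNat + 1) := by
      have h1 : c.drop (dot.toNat + 1) = (c.drop dot.toNat).drop 1 := by
        rw [List.drop_drop]
      rw [h1, ← hu]
      rfl
    constructor
    · intro hmem
      rcases List.mem_cons.mp hmem with heq0 | hs
      · exact Or.inl heq0
      · rcases (ih).mp hs with heq | hsuf
        · exact Or.inr (heq ▸ hkey ▸ List.drop_suffix dot.toNat c)
        · exact Or.inr (hsuf.trans ((List.drop_suffix (dot.toNat + 1) c)))
    · rintro (rfl | hsuf)
      · exact List.mem_cons_self
      · obtain ⟨t, ht⟩ := hsuf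
        have hle : dot.toNat ≤ t.length := by
          by_contra hlt
          exact hmin t.length (by omega) ⟨s, by rw [← ht, List.drop_left]; rfl⟩
        rcases Nat.eq_or_lt_of_le hle with heq | hlt
        · have hcs : c.drop (dot.toNat + 1) = s := by
            have : c.drop t.length = '.' :: s := by rw [← ht, List.drop_left]
            rw [heq, this] at hkey
            rw [heq]
            exact ((List.cons.injEq _ _ _ _).mp hkey.symm).2
          exact List.mem_cons_of_mem _ (ih.mpr (Or.inl hcs.symm))
        · refine List.mem_cons_of_mem _ (ih.mpr (Or.inr ?_))
          have hlen : c.length = t.length + (s.length + 1) := by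
            rw [← ht]; simp
          refine List.suffix_iff_eq_drop.mpr ?_
          have hlen' : (c.drop (dot.toNat + 1)).length = c.length - (dot.toNat + 1) := by simp
          rw [hlen', List.drop_drop]
          have harith : (c.length - (dot.toNat + 1) - ('.' :: s).length) + (dot.toNat + 1) = t.length := by
            simp only [List.length_cons]
            omega
          rw [Nat.add_comm (dot.toNat + 1), harith, ← ht, List.drop_left]

theorem pvBuildIdx_get (l : List String) (i : Nat) (d : PySem.Dict (List Char) Nat)
    (k : List Char) :
    (pvBuildIdx l i d).get? k =
      match d.get? k with
      | some v => some v
      | none => (List.findIdx? (fun x => PySem.Chars.lower x.toList == k) l).map (· + i) := by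
  induction l generalizing i d with
  | nil => cases hd : d.get? k <;> simp [pvBuildIdx, hd]
  | cons x rest ih =>
    simp only [pvBuildIdx, List.findIdx?_cons]
    cases hd : d.get? k with
    | some v =>
      have hd' : (if d.contains (PySem.Chars.lower x.toList) then d
          else d.insert (PySem.Chars.lower x.toList) i).get? k = some v := by
        split
        · exact hd
        · rcases eq_or_ne k (PySem.Chars.lower x.toList) with rfl | hne
          · simp [PySem.Dict.contains_eq_isSome_get?, hd] at *
          · rw [PySem.Dict.get?_insert_of_ne _ _ hne]; exact hd
      rw [ih _ _, hd']
    | none =>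
      cases hp : (PySem.Chars.lower x.toList == k) with
      | true =>
        have hk : k = PySem.Chars.lower x.toList := (beq_iff_eq.mp hp).symm
        have hc : d.contains (PySem.Chars.lower x.toList) = false := by
          rw [PySem.Dict.contains_eq_isSome_get?, ← hk, hd]; rfl
        have hd' : (if d.contains (PySem.Chars.lower x.toList) then d
            else d.insert (PySem.Chars.lower x.toList) i).get? k = some i := by
          rw [if_neg (by simp [hc]), hk, PySem.Dict.get?_insert_self]
        rw [ih _ _, hd']
        simp
      | false =>
        have hne : k ≠ PySem.Chars.lower x.toList := by
          intro h; rw [h] at hp; simp at hp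
        have hd' : (if d.contains (PySem.Chars.lower x.toList) then d
            else d.insert (PySem.Chars.lower x.toList) i).get? k = none := by
          split
          · exact hd
          · rw [PySem.Dict.get?_insert_of_ne _ _ hne]; exact hd
        rw [ih _ _, hd']
        cases List.findIdx? (fun x => PySem.Chars.lower x.toList == k) rest <;>
          simp [Nat.add_assoc, Nat.add_comm 1 i]

theorem pvStep_eq (g best0 : Option Nat) :
    (match g with
     | some j => match best0 with
                 | none => some j
                 | some b => if j < b then some j else some b
     | none => best0)
    = (best0.toList ++ g.toList).min? := by
  cases g with
  | none => cases best0 <;> simp [List.min?_cons]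
  | some j =>
    cases best0 with
    | none => simp [List.min?_cons]
    | some b =>
      have hm : ([b, j] : List Nat).min? = some (min b j) := rfl
      simp only [Option.toList, List.cons_append, List.nil_append, hm]
      rw [Nat.min_def]
      split_ifs <;> first | rfl | omega

theorem pvMin?_append (l L : List Nat) : (l ++ L).min? = (l.min?.toList ++ L).min? := by
  induction l with
  | nil => rfl
  | cons a l ih =>
    simp only [List.cons_append, List.min?_cons] at *
    cases hl : l.min? with
    | none =>
      simp only [hl, Option.elim] at *
      simp only [Option.toList, List.cons_append, List.min?_cons]
      cases hL : L.min? <;> simp [ih, hL]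
    | some ml =>
      simp only [hl, Option.elim] at *
      simp only [Option.toList, List.cons_append, List.min?_cons]
      rw [ih]
      simp only [Option.toList, List.cons_append, List.min?_cons]
      cases hL : L.min? <;> simp [hL, Nat.min_assoc]

theorem pvScan_eq_min? (cand : List Char) (idx : PySem.Dict (List Char) Nat)
    (best : Option Nat) :
    pvScan cand idx best = (best.toList ++ (pvChain cand).filterMap idx.get?).min? := by
  fun_induction pvScan cand idx best with
  | case1 cand best0 best' dot hdot =>
    rw [pvChain]
    have hdot' : PySem.Chars.find cand ['.'] = -1 := hdot
    rw [dif_pos hdot']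
    have hb : best' = (best0.toList ++ (idx.get? cand).toList).min? := pvStep_eq _ _
    rw [hb]
    cases hg : idx.get? cand <;> simp [hg]
  | case2 cand best0 best' dot hdot ih =>
    rw [pvChain]
    have hdot' : ¬ PySem.Chars.find cand ['.'] = -1 := hdot
    rw [dif_neg hdot']
    have hb : best' = (best0.toList ++ (idx.get? cand).toList).min? := pvStep_eq _ _
    rw [ih, hb, ← pvMin?_append, List.append_assoc]
    congr 1
    cases hg : idx.get? cand <;> simp only [hg, List.filterMap_cons, Option.toList,
      List.cons_append, List.nil_append] <;> rfl

theorem pvMatchLoop_eq_find? (host : String) (l : List String) :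
    pvMatchLoop host l =
      l.find? (fun d => host == PySem.Str.lower d
                 || PySem.Str.endswith host ("." ++ PySem.Str.lower d)) := by
  induction l with
  | nil => rfl
  | cons d rest ih =>
    simp only [pvMatchLoop, List.find?_cons]
    cases h : (host == PySem.Str.lower d
        || PySem.Str.endswith host ("." ++ PySem.Str.lower d)) <;> simp [ih]

theorem pvP_iff (host : String) (d : String) :
    (host == PySem.Str.lower d
       || PySem.Str.endswith host ("." ++ PySem.Str.lower d)) = true
      ↔ PySem.Chars.lower d.toList ∈ pvChain host.toList := by
  rw [pvChain_mem]
  have h1 : ("." ++ PySem.Str.lower d).toList = '.' :: PySem.Chars.lower d.toList := by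
    simp [PySem.Str.toList_lower]
  have h2 : (host == PySem.Str.lower d) = true ↔ PySem.Chars.lower d.toList = host.toList := by
    rw [beq_iff_eq, ← String.toList_inj, PySem.Str.toList_lower, eq_comm]
  rw [Bool.or_eq_true, h2, PySem.Str.endswith_eq, h1, PySem.Chars.endswith_iff]

theorem pv_main (host : String) (ai : List String) :
    pvMatchLoop host ai =
      (match pvScan host.toList (pvBuildIdx ai 0 PySem.Dict.empty) none with
       | none => none
       | some j => PySem.List.pyGet? ai (j : Int)) := by
  have hidx : ∀ c, (pvBuildIdx ai 0 PySem.Dict.empty).get? c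
      = ai.findIdx? (fun x => PySem.Chars.lower x.toList == c) := by
    intro c
    rw [pvBuildIdx_get]
    simp [PySem.Dict.get?_empty]
  have hS : (pvChain host.toList).filterMap (pvBuildIdx ai 0 PySem.Dict.empty).get?
      = (pvChain host.toList).filterMap
          (fun c => ai.findIdx? (fun x => PySem.Chars.lower x.toList == c)) := by
    exact List.filterMap_congr (fun c _ => hidx c)
  set P : String → Bool := fun d => host == PySem.Str.lower d
      || PySem.Str.endswith host ("." ++ PySem.Str.lower d) with hP
  have hmain : ((pvChain host.toList).filterMap
      (fun c => ai.findIdx? (fun x => PySem.Chars.lower x.toList == c))).min?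
      = ai.findIdx? P := by
    cases hfi : ai.findIdx? P with
    | none =>
      rw [List.min?_eq_none_iff, List.filterMap_eq_nil_iff]
      intro c hc
      cases hj : ai.findIdx? (fun x => PySem.Chars.lower x.toList == c) with
      | none => rfl
      | some j =>
        exfalso
        obtain ⟨hjl, hjc, -⟩ := List.findIdx?_eq_some_iff_getElem.mp hj
        have hcj : PySem.Chars.lower ai[j].toList = c := beq_iff_eq.mp hjc
        have hPj : P ai[j] = true := (pvP_iff host ai[j]).mpr (hcj ▸ hc)
        have := List.findIdx?_eq_none_iff.mp hfi ai[j] (List.getElem_mem hjl)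
        simp [hPj] at this
    | some i =>
      obtain ⟨hil, hPi, himin⟩ := List.findIdx?_eq_some_iff_getElem.mp hfi
      have hlb : ∀ b ∈ (pvChain host.toList).filterMap
          (fun c => ai.findIdx? (fun x => PySem.Chars.lower x.toList == c)), i ≤ b := by
        intro b hb
        obtain ⟨c, hc, hcb⟩ := List.mem_filterMap.mp hb
        obtain ⟨hbl, hbc, -⟩ := List.findIdx?_eq_some_iff_getElem.mp hcb
        have hcb' : PySem.Chars.lower ai[b].toList = c := beq_iff_eq.mp hbc
        have hPb : P ai[b] = true := (pvP_iff host ai[b]).mpr (hcb' ▸ hc)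
        by_contra hbi
        exact absurd hPb (by simpa using himin b (by omega))
      have hmem : i ∈ (pvChain host.toList).filterMap
          (fun c => ai.findIdx? (fun x => PySem.Chars.lower x.toList == c)) := by
        have hc0 : PySem.Chars.lower ai[i].toList ∈ pvChain host.toList :=
          (pvP_iff host ai[i]).mp hPi
        have hex : ∃ x ∈ ai, (fun x => PySem.Chars.lower x.toList
            == PySem.Chars.lower ai[i].toList) x = true :=
          ⟨ai[i], List.getElem_mem hil, by simp⟩
        cases hj : ai.findIdx? (fun x => PySem.Chars.lower x.toList
            == PySem.Chars.lower ai[i].toList) with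
        | none =>
          exfalso
          obtain ⟨x, hx, hpx⟩ := hex
          have := List.findIdx?_eq_none_iff.mp hj x hx
          simp_all
        | some j =>
          obtain ⟨hjl, hjc, hjmin⟩ := List.findIdx?_eq_some_iff_getElem.mp hj
          have hcj : PySem.Chars.lower ai[j].toList = PySem.Chars.lower ai[i].toList :=
            beq_iff_eq.mp hjc
          have hPj : P ai[j] = true := (pvP_iff host ai[j]).mpr (hcj ▸ hc0)
          have hij : i ≤ j := by
            by_contra hij
            exact absurd hPj (by simpa using himin j (by omega))
          have hji : j ≤ i := by
            by_contra hji
            have := hjmin i (by omega)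
            simp at this
          have : j = i := by omega
          subst this
          exact List.mem_filterMap.mpr ⟨_, hc0, hj⟩
      exact List.min?_eq_some_iff.mpr ⟨hmem, hlb⟩
  rw [pvMatchLoop_eq_find?, List.find?_eq_bind_findIdx?_getElem?, ← hP,
    pvScan_eq_min?, hS]
  simp only [Option.toList, List.nil_append, hmain]
  cases ai.findIdx? P <;> simp [PySem.List.pyGet?_natCast]

-- ===== VERDICT (by name: the statement is the Claim_ definition above) =====
theorem match_referrer_spec : Claim_equal_match_referrer := by
  intro referer ai _
  unfold Spec_match_referrer match_referrer match_referrer_alt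
  by_cases h1 : referer == ""
  · simp [h1]
  · by_cases h2 : pvExtractHost referer == ""
    · simp [h1, h2]
    · simp only [h1, h2, if_false, Bool.false_eq_true]
      exact pv_main _ ai
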